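-- pv_equiv track=rewrite | github.com/ladamalina/leetcode-2020-python | 36-valid-sudoku/main.py | isValidBlock
-- ===== SOURCE A (Python) =====
-- from typing import List
--
-- def isValidBlock(lists: List[List[str]]) -> bool:
--     seen_nums = set()
--     for l in lists:
--         for num in l:
--             if num == ".":
--                 continue
--             if num in seen_nums:
--                 return False
--             seen_nums.add(num)
--     return True
-- ===== SOURCE B (Python) =====
-- def isValidBlock(lists):
--     flat = sorted(num for l in lists for num in l if num != ".")
--     return all(a != b for a, b in zip(flat, flat[1:]))
-- ===== Notes on version B (the rewrite author's own statement) =====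
-- stated objective: alternative
-- what changed: Replaces the early-exit nested loop with an incremental seen-set by a sort-then-scan: gather all non-'.' entries into one flat list, sort it, and check that no two adjacent entries are equal.
import Mathlib
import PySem

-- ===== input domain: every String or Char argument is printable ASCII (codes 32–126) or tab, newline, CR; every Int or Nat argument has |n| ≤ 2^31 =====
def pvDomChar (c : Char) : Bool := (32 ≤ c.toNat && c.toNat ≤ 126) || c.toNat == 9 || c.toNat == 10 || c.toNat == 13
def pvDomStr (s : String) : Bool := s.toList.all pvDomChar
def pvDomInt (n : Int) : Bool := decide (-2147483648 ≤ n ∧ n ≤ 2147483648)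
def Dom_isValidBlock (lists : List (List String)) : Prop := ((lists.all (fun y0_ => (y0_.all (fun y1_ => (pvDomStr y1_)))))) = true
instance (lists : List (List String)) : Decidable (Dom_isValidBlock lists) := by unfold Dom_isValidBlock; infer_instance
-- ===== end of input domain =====

-- B replaces A's early-exit seen-set scan by sort-then-adjacent-compare (alternative algorithm, same return value).

-- ===== PORT A =====
-- inner 'for num in l' loop; 'none' models the early 'return False'
def isValidBlockInner (seen : PySem.Set String) (l : List String) : Option (PySem.Set String) :=
  match l with
  | [] => some seen
  | num :: rest =>
    if num == "." then isValidBlockInner seen rest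
    else if PySem.Set.contains seen num then none
    else isValidBlockInner (PySem.Set.add seen num) rest

-- outer 'for l in lists' loop
def isValidBlockOuter (seen : PySem.Set String) (lists : List (List String)) : Bool :=
  match lists with
  | [] => true
  | l :: rest =>
    match isValidBlockInner seen l with
    | none => false
    | some seen' => isValidBlockOuter seen' rest

def isValidBlock (lists : List (List String)) : Bool :=
  isValidBlockOuter PySem.Set.empty lists

-- ===== PORT B =====
-- flat = sorted(num for l in lists for num in l if num != "."); all(a != b for a, b in zip(flat, flat[1:]))
def isValidBlock_alt (lists : List (List String)) : Bool :=
  let flat := PySem.List.sorted (lists.flatMap (fun l => l.filter (fun num => num != "."))) (fun x => x) false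
  (flat.zip (PySem.List.slice flat (some 1) none)).all (fun p => p.1 != p.2)

-- ===== PRECONDITION & SPEC =====
def Spec_isValidBlock (lists : List (List String)) (out : Bool) : Prop := out = isValidBlock_alt lists
instance (lists : List (List String)) (out : Bool) : Decidable (Spec_isValidBlock lists out) := by unfold Spec_isValidBlock; infer_instance

-- ===== CLAIM (what is proved, stated in full; the proofs are below) =====
def Claim_equal_isValidBlock : Prop := ∀ (lists : List (List String)), Dom_isValidBlock lists → Spec_isValidBlock lists (isValidBlock lists)

-- ===== LEMMAS AND PROOFS =====

-- A's inner loop on a duplicate-free seen set: returns seen ++ the non-"." entries if that stays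
-- duplicate-free, and none (Python's 'return False') otherwise.
lemma inner_char (l : List String) (seen : PySem.Set String) (hs : seen.Nodup) :
    isValidBlockInner seen l =
      if (seen ++ l.filter (fun num => num != ".")).Nodup
      then some (seen ++ l.filter (fun num => num != "."))
      else none := by
  induction l generalizing seen with
  | nil => simp [isValidBlockInner, hs]
  | cons num rest ih =>
    by_cases h1 : num = "."
    · simp [isValidBlockInner, h1, ih seen hs]
    · by_cases h2 : num ∈ seen
      · have hnd : ¬ (seen ++ num :: List.filter (fun num => num != ".") rest).Nodup := fun h =>
          (List.disjoint_of_nodup_append h) h2 (List.mem_cons_self ..)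
        rw [isValidBlockInner]
        simp [h1, h2, hnd]
      · have hadd : PySem.Set.add seen num = seen ++ [num] := by
          simp [PySem.Set.add, h2]
        have hnd : (seen ++ [num]).Nodup := by
          simp only [List.nodup_append, hs, List.nodup_cons, List.not_mem_nil, not_false_iff,
            List.nodup_nil, and_true, true_and]
          exact fun a ha b hb => by simp at hb; subst hb; exact fun he => h2 (he ▸ ha)
        rw [isValidBlockInner]
        simp only [if_neg (by simp [h1] : ¬ (num == ".") = true), hadd, ih _ hnd]
        simp [h1, h2, List.append_assoc]

-- A's outer loop threads the seen set through the rows.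
lemma outer_char (lists : List (List String)) (seen : PySem.Set String) (hs : seen.Nodup) :
    isValidBlockOuter seen lists =
      decide (seen ++ lists.flatMap (fun l => l.filter (fun num => num != "."))).Nodup := by
  induction lists generalizing seen with
  | nil => simp [isValidBlockOuter, hs]
  | cons l rest ih =>
    rw [isValidBlockOuter, inner_char l seen hs]
    by_cases hnd : (seen ++ l.filter (fun num => num != ".")).Nodup
    · rw [if_pos hnd]
      show isValidBlockOuter (seen ++ l.filter (fun num => num != ".")) rest = _
      rw [ih _ hnd]
      simp [List.append_assoc]
    · rw [if_neg hnd]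
      have hbig : ¬ (seen ++ (List.filter (fun num => num != ".") l ++
          rest.flatMap (fun l => l.filter (fun num => num != ".")))).Nodup := by
        intro h
        rw [← List.append_assoc] at h
        exact hnd (h.sublist (List.sublist_append_left _ _))
      simp [hbig]

lemma adj_nodup (s : List String) (hp : s.Pairwise (· ≤ ·)) :
    (s.zip s.tail).all (fun p => p.1 != p.2) = decide s.Nodup := by
  induction s with
  | nil => simp
  | cons a t ih =>
    cases t with
    | nil => simp
    | cons b u =>
      obtain ⟨h1, h2⟩ := List.pairwise_cons.mp hp
      obtain ⟨h3, _⟩ := List.pairwise_cons.mp h2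
      have key := ih h2
      simp only [List.tail_cons] at key
      simp only [List.tail_cons, List.zip_cons_cons, List.all_cons, key]
      by_cases hab : a = b
      · subst hab; simp
      · have hnu : a ∉ u := fun hm => hab (le_antisymm (h1 b (by simp)) (h3 a hm))
        simp [List.nodup_cons, hab, hnu]

-- ===== VERDICT (by name: the statement is the Claim_ definition above) =====
theorem isValidBlock_spec : Claim_equal_isValidBlock := by
  intro lists _
  unfold Spec_isValidBlock
  have key : isValidBlock_alt lists =
      decide (lists.flatMap (fun l => l.filter (fun num => num != "."))).Nodup := by
    unfold isValidBlock_alt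
    simp only [PySem.List.slice_from_one]
    rw [adj_nodup _ (PySem.List.sorted_pairwise _ (fun x => x))]
    simp [List.Perm.nodup_iff (PySem.List.sorted_perm _ (fun x => x) false)]
  rw [key, isValidBlock, outer_char lists PySem.Set.empty (by simp [PySem.Set.empty])]
  simp [PySem.Set.empty]
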